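-- pv_equiv track=rewrite | github.com/wangwenlong2000/imiss-deer-flow | skills/custom/trajectory-anomaly-detection/scripts/anomaly_lib.py | detect_group_col
-- ===== SOURCE A (Python) =====
-- from typing import Any, Iterable
--
-- GROUP_CANDIDATES = (
--     "meta.geo_scope.geohash",
--     "geo_scope.geohash",
--     "geohash",
--     "user_id",
--     "trajectory_id",
--     "trip_id",
--     "city",
--     "meta.geo_scope.city",
-- )
--
-- def detect_group_col(flat_records: list[dict[str, Any]], explicit: str | None = None) -> str | None:
--     if explicit:
--         return explicit
--     keys = {key for record in flat_records for key in record.keys()}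
--     for candidate in GROUP_CANDIDATES:
--         if candidate in keys:
--             return candidate
--     return None
-- ===== SOURCE B (Python) =====
-- GROUP_CANDIDATES = (
--     "meta.geo_scope.geohash",
--     "geo_scope.geohash",
--     "geohash",
--     "user_id",
--     "trajectory_id",
--     "trip_id",
--     "city",
--     "meta.geo_scope.city",
-- )
--
-- _RANK = {c: i for i, c in enumerate(GROUP_CANDIDATES)}
--
-- def detect_group_col(flat_records, explicit=None):
--     if explicit:
--         return explicit
--     n = len(GROUP_CANDIDATES)
--     best = n
--     for record in flat_records:
--         for key in record:
--             best = min(best, _RANK.get(key, n))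
--     return GROUP_CANDIDATES[best] if best < n else None
-- ===== Notes on version B (the rewrite author's own statement) =====
-- stated objective: alternative
-- what changed: Inverts the search: instead of scanning the candidate priority list against a set of all record keys, B makes a single pass over the record keys keeping the minimum candidate rank seen (via a precomputed rank dict) and indexes the candidate tuple with that minimum at the end.
import Mathlib
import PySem

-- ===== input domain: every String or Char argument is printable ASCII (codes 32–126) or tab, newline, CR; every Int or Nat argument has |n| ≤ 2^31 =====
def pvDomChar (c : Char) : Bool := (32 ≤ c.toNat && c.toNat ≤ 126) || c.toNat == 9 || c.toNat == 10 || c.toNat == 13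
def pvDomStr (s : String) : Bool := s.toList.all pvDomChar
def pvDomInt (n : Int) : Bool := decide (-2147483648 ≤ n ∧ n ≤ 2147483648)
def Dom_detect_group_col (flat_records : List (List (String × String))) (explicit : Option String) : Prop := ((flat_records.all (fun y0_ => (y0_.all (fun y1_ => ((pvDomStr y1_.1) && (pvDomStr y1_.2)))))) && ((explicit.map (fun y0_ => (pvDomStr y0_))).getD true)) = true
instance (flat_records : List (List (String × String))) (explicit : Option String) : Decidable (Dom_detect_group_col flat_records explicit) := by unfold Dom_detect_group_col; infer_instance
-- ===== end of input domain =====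

-- B inverts A's search: one pass over the record keys keeping the minimum candidate rank
-- (looked up in a precomputed rank dict), then the candidate tuple is indexed once; objective: alternative.
-- ===== PORT A =====
def GROUP_CANDIDATES : List String :=
  ["meta.geo_scope.geohash", "geo_scope.geohash", "geohash", "user_id",
   "trajectory_id", "trip_id", "city", "meta.geo_scope.city"]

-- 'if explicit:' — truthy: explicit is not None and not ""
def pyTruthy (explicit : Option String) : Bool :=
  match explicit with
  | some s => s ≠ ""
  | none => false

-- the for-loop 'for candidate in GROUP_CANDIDATES: if candidate in keys: return candidate'
def findInKeys (cands : List String) (keys : PySem.Set String) : Option String :=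
  match cands with
  | [] => none
  | c :: rest => if keys.contains c then some c else findInKeys rest keys

def detect_group_col (flat_records : List (List (String × String))) (explicit : Option String) : Option String :=
  if pyTruthy explicit then explicit
  else
    -- keys = {key for record in flat_records for key in record.keys()}
    let keys : PySem.Set String :=
      flat_records.foldl (fun s r => PySem.Set.update s (r.map Prod.fst)) PySem.Set.empty
    findInKeys GROUP_CANDIDATES keys

-- ===== PORT B =====
-- _RANK = {c: i for i, c in enumerate(GROUP_CANDIDATES)}
def RANK : PySem.Dict String Int :=
  (PySem.List.enumerate GROUP_CANDIDATES 0).foldl (fun d p => d.insert p.2 p.1) PySem.Dict.empty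

def detect_group_col_alt (flat_records : List (List (String × String))) (explicit : Option String) : Option String :=
  if pyTruthy explicit then explicit
  else
    let n : Int := (GROUP_CANDIDATES.length : Int)
    -- best = n; for record in flat_records: for key in record: best = min(best, _RANK.get(key, n))
    let best : Int :=
      flat_records.foldl (fun b r => r.foldl (fun b kv => min b (RANK.getD kv.1 n)) b) n
    -- return GROUP_CANDIDATES[best] if best < n else None  (best is in range in that branch)
    if best < n then PySem.List.pyGet? GROUP_CANDIDATES best else none

-- ===== PRECONDITION & SPEC =====
def Spec_detect_group_col (flat_records : List (List (String × String))) (explicit : Option String) (out : Option String) : Prop := out = detect_group_col_alt flat_records explicit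
instance (flat_records : List (List (String × String))) (explicit : Option String) (out : Option String) : Decidable (Spec_detect_group_col flat_records explicit out) := by unfold Spec_detect_group_col; infer_instance

-- ===== CLAIM =====
def Claim_equal_detect_group_col : Prop := ∀ (flat_records : List (List (String × String))) (explicit : Option String), Dom_detect_group_col flat_records explicit → Spec_detect_group_col flat_records explicit (detect_group_col flat_records explicit)

-- ===== LEMMAS AND PROOFS =====
lemma rank_getD (k : String) :
    RANK.getD k (GROUP_CANDIDATES.length : Int) = (GROUP_CANDIDATES.idxOf k : Int) := by
  simp only [RANK, GROUP_CANDIDATES, PySem.List.enumerate_cons, PySem.List.enumerate_nil,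
    List.foldl_cons, List.foldl_nil, List.length_cons, List.length_nil]
  simp only [PySem.Dict.getD_insert, PySem.Dict.getD_empty, List.idxOf_cons, Bool.beq_comm,
    Bool.cond_eq_ite, beq_iff_eq]
  split_ifs <;> simp_all

lemma findInKeys_eq_find? (cands : List String) (keys : PySem.Set String) :
    findInKeys cands keys = cands.find? (fun c => keys.contains c) := by
  induction cands with
  | nil => rfl
  | cons c rest ih => by_cases hc : c ∈ keys <;> simp [findInKeys, List.find?, hc, ih]

lemma mem_foldl_update (flat_records : List (List (String × String)))
    (s : PySem.Set String) (c : String) :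
    c ∈ flat_records.foldl (fun s r => PySem.Set.update s (r.map Prod.fst)) s
      ↔ c ∈ s ∨ c ∈ flat_records.flatMap (·.map Prod.fst) := by
  induction flat_records generalizing s with
  | nil => simp
  | cons r rest ih => simp [List.foldl_cons, ih, PySem.Set.mem_update]; tauto

-- fold-min helpers
lemma foldl_min_le_init (f : String → Nat) (ks : List String) (a : Nat) :
    ks.foldl (fun b k => min b (f k)) a ≤ a := by
  induction ks generalizing a with
  | nil => simp
  | cons k ks ih => exact le_trans (ih _) (min_le_left _ _)

lemma foldl_min_eq_zero (f : String → Nat) (ks : List String) (a : Nat)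
    (k : String) (hk : k ∈ ks) (h0 : f k = 0) :
    ks.foldl (fun b k => min b (f k)) a = 0 := by
  induction ks generalizing a with
  | nil => simp at hk
  | cons x ks ih =>
      rcases List.mem_cons.1 hk with rfl | hk
      · simp only [List.foldl_cons, h0, Nat.min_zero]
        exact Nat.le_zero.1 (foldl_min_le_init f ks 0)
      · simp only [List.foldl_cons]
        exact ih _ hk

lemma foldl_min_succ (f : String → Nat) (ks : List String) (a : Nat) :
    ks.foldl (fun b k => min b (f k + 1)) (a + 1)
      = ks.foldl (fun b k => min b (f k)) a + 1 := by
  induction ks generalizing a with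
  | nil => rfl
  | cons k ks ih => simpa [Nat.succ_min_succ] using ih (min a (f k))

lemma foldl_min_congr (f g : String → Nat) (ks : List String) (a : Nat)
    (h : ∀ k ∈ ks, f k = g k) :
    ks.foldl (fun b k => min b (f k)) a = ks.foldl (fun b k => min b (g k)) a := by
  induction ks generalizing a with
  | nil => rfl
  | cons x ks ih =>
      simp only [List.foldl_cons, h x List.mem_cons_self]
      exact ih _ (fun k hk => h k (List.mem_cons_of_mem _ hk))

-- the heart: indexing the candidate list with the minimum idxOf over the keys
-- is exactly the first candidate that occurs among the keys
lemma key_lemma (cs ks : List String) :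
    cs[ks.foldl (fun b k => min b (cs.idxOf k)) cs.length]?
      = cs.find? (fun c => ks.contains c) := by
  induction cs generalizing ks with
  | nil => simp
  | cons c cs ih =>
      by_cases h : ks.contains c
      · have hc : c ∈ ks := by simpa using h
        rw [foldl_min_eq_zero _ _ _ c hc (by simp)]
        simp [List.find?, hc]
      · have hne : ∀ k ∈ ks, k ≠ c := by
          intro k hk; rintro rfl; exact h (by simpa using hk)
        have hstep : ∀ k ∈ ks, (c :: cs).idxOf k = cs.idxOf k + 1 := by
          intro k hk
          have : (c == k) = false := by simp [(hne k hk).symm]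
          simp [List.idxOf_cons, this]
        rw [foldl_min_congr _ _ _ _ hstep]
        have : (c :: cs).length = cs.length + 1 := rfl
        rw [this, foldl_min_succ]
        have hc : c ∉ ks := by simpa using h
        simp [List.find?, hc, ih ks]

-- cast bridge: the Int-valued loop of the port equals the Nat-valued fold
lemma foldl_min_intCast (f : String → Nat) (ks : List String) (a : Nat) :
    ks.foldl (fun b k => min b ((f k : Int))) (a : Int)
      = ((ks.foldl (fun b k => min b (f k)) a : Nat) : Int) := by
  induction ks generalizing a with
  | nil => rfl
  | cons k ks ih => simpa [Nat.cast_min] using ih (min a (f k))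

lemma nested_foldl_eq_flatMap (flat_records : List (List (String × String))) (a : Int) :
    flat_records.foldl
        (fun b r => r.foldl (fun b kv => min b (RANK.getD kv.1 (GROUP_CANDIDATES.length : Int))) b) a
      = (flat_records.flatMap (·.map Prod.fst)).foldl
          (fun b k => min b (RANK.getD k (GROUP_CANDIDATES.length : Int))) a := by
  induction flat_records generalizing a with
  | nil => rfl
  | cons r rest ih =>
      simp only [List.foldl_cons, List.flatMap_cons, List.foldl_append, ih, List.foldl_map]

-- ===== VERDICT =====
theorem detect_group_col_spec : Claim_equal_detect_group_col := by
  intro flat_records explicit _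
  unfold Spec_detect_group_col detect_group_col detect_group_col_alt
  by_cases h : pyTruthy explicit
  · simp [h]
  · simp only [h, if_false, Bool.false_eq_true]
    set ks := flat_records.flatMap (·.map Prod.fst) with hks
    -- A side
    have hcontains : ∀ c : String,
        (flat_records.foldl (fun s r => PySem.Set.update s (r.map Prod.fst)) PySem.Set.empty).contains c
          = ks.contains c := by
      intro c
      rw [Bool.eq_iff_iff, PySem.Set.contains_iff, mem_foldl_update]
      simp [PySem.Set.empty, hks]
    have hA : findInKeys GROUP_CANDIDATES
        (flat_records.foldl (fun s r => PySem.Set.update s (r.map Prod.fst)) PySem.Set.empty)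
        = GROUP_CANDIDATES.find? (fun c => ks.contains c) := by
      rw [findInKeys_eq_find?]
      simp only [hcontains]
    rw [hA]
    -- B side: the Int loop is the Nat min-of-idxOf fold over the flattened keys
    have hB : flat_records.foldl
        (fun b r => r.foldl (fun b kv => min b (RANK.getD kv.1 (GROUP_CANDIDATES.length : Int))) b)
        (GROUP_CANDIDATES.length : Int)
        = ((ks.foldl (fun b k => min b (GROUP_CANDIDATES.idxOf k)) GROUP_CANDIDATES.length : Nat) : Int) := by
      rw [nested_foldl_eq_flatMap]
      simp only [rank_getD]
      exact foldl_min_intCast _ _ _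
    simp only [hB]
    by_cases hlt : ks.foldl (fun b k => min b (GROUP_CANDIDATES.idxOf k)) GROUP_CANDIDATES.length
        < GROUP_CANDIDATES.length
    · rw [if_pos (by exact_mod_cast hlt), PySem.List.pyGet?_natCast]
      exact (key_lemma GROUP_CANDIDATES ks).symm
    · rw [if_neg (by exact_mod_cast hlt)]
      have hbn : ks.foldl (fun b k => min b (GROUP_CANDIDATES.idxOf k)) GROUP_CANDIDATES.length
          = GROUP_CANDIDATES.length :=
        le_antisymm (foldl_min_le_init _ _ _) (not_lt.1 hlt)
      rw [← key_lemma GROUP_CANDIDATES ks, hbn]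
      simp
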